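-- pv_equiv track=rewrite | github.com/defin85/command-center-1c | orchestrator/apps/intercompany_pools/validators.py | _compute_node_level
-- ===== SOURCE A (Python) =====
-- from collections import deque
--
-- def _compute_node_level(root_id: str, adjacency: dict[str, list[str]]) -> dict[str, int]:
--     levels: dict[str, int] = {root_id: 0}
--     queue: deque[str] = deque([root_id])
--
--     while queue:
--         node_id = queue.popleft()
--         for child_id in adjacency.get(node_id, []):
--             candidate_level = levels[node_id] + 1
--             current_level = levels.get(child_id)
--             if current_level is None or candidate_level < current_level:
--                 levels[child_id] = candidate_level
--                 queue.append(child_id)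
--
--     return levels
-- ===== SOURCE B (Python) =====
-- def _compute_node_level(root_id: str, adjacency: dict[str, list[str]]) -> dict[str, int]:
--     seen: set[str] = {root_id}
--     layers: list[list[str]] = [[root_id]]
--     while layers[-1]:
--         nxt: list[str] = []
--         for node in layers[-1]:
--             for child in adjacency.get(node, []):
--                 if child not in seen:
--                     seen.add(child)
--                     nxt.append(child)
--         layers.append(nxt)
--     return {node: depth for depth, layer in enumerate(layers) for node in layer}
-- ===== Notes on version B (the rewrite author's own statement) =====
-- stated objective: alternative
-- what changed: Replaces A's deque-driven BFS with its relaxation branch (comparing levels[node]+1 against the child's stored level) by a staged layered BFS: phase 1 computes the list of BFS layers using only a seen-set (no levels during traversal, no relaxation test, which provably never fires in BFS order), phase 2 builds the levels dict in one comprehension from enumerate(layers).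
import Mathlib
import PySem

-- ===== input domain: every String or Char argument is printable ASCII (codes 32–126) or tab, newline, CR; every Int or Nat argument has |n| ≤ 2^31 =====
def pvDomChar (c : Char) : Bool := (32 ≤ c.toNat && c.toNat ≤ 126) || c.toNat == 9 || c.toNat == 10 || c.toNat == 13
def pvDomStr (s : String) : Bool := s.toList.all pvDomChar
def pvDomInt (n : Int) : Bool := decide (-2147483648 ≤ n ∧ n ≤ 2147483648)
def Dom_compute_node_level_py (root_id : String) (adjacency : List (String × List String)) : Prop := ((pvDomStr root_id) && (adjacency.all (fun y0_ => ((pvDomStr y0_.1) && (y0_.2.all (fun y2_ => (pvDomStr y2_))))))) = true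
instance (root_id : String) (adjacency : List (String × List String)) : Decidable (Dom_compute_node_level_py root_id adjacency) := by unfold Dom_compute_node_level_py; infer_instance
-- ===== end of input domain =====

-- B replaces A's deque-plus-relaxation BFS (levels dict maintained during traversal) by a staged
-- layered BFS: first compute the list of BFS layers with only a seen-set, then build the levels
-- dict from enumerate(layers); same return value, different decomposition.

-- shared port of Python's 'adjacency.get(node_id, [])' (both sources contain this exact expression)
def pvAdj (adjacency : List (String × List String)) (node : String) : List String :=
  (PySem.Dict.ofList adjacency).getD node []

-- ===== PORT A =====
-- A's inner for-body: candidate level from levels[node_id], relaxation test, append child to the queue.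
-- 'levels[node_id]' is ported as 'getD node 0': whenever A executes this line node is a key of levels
-- (BFS only enqueues labeled nodes), so the default is never consulted and Python raises nowhere.
def pvA_child (node : String) (s : PySem.Dict String Int × List String) (c : String) :
    PySem.Dict String Int × List String :=
  let cand := s.1.getD node 0 + 1
  match s.1.get? c with
  | none => (s.1.insert c cand, s.2 ++ [c])
  | some cur => if cand < cur then (s.1.insert c cand, s.2 ++ [c]) else s

-- A's while-loop over the deque (state = levels, queue); the fuel argument only makes the recursion
-- structural — the fuel passed below is proved sufficient, so the exhaustion branch is never taken.
def pvA_loop (adjacency : List (String × List String)) :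
    Nat → PySem.Dict String Int → List String → PySem.Dict String Int
  | _, levels, [] => levels
  | 0, levels, _ :: _ => levels
  | fuel + 1, levels, node :: queue =>
      let s := (pvAdj adjacency node).foldl (pvA_child node) (levels, queue)
      pvA_loop adjacency fuel s.1 s.2

def compute_node_level_py (root_id : String) (adjacency : List (String × List String)) :
    List (String × Int) :=
  (pvA_loop adjacency (1 + adjacency.foldl (fun n p => n + p.2.length) 0)
    (PySem.Dict.ofList [(root_id, 0)]) [root_id]).items

-- ===== PORT B =====
-- B phase 1, inner for-body: an unseen child is added to the seen-set and to the next layer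
def pvB_child (s : PySem.Set String × List String) (c : String) :
    PySem.Set String × List String :=
  if PySem.Set.contains s.1 c then s else (PySem.Set.add s.1 c, s.2 ++ [c])

-- B phase 1, middle for-loop: scan one layer node's adjacency
def pvB_node (adjacency : List (String × List String))
    (s : PySem.Set String × List String) (node : String) :
    PySem.Set String × List String :=
  (pvAdj adjacency node).foldl pvB_child s

-- B phase 1, while-loop: grow the layer list until the last layer is empty (which Python also
-- appends; it contributes nothing in phase 2). Fuel only makes the recursion structural; the
-- fuel passed below is proved sufficient, so the exhaustion branch is never taken.
def pvB_layers (adjacency : List (String × List String)) :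
    Nat → PySem.Set String → List String → List (List String)
  | 0, _, cur => [cur]
  | fuel + 1, seen, cur =>
      if cur.isEmpty then [cur]
      else
        let s := cur.foldl (pvB_node adjacency) (seen, [])
        cur :: pvB_layers adjacency fuel s.1 s.2

-- B phase 2: the dict comprehension {node: depth for depth, layer in enumerate(layers) for node in layer}
def compute_node_level_py_alt (root_id : String) (adjacency : List (String × List String)) :
    List (String × Int) :=
  let layers := pvB_layers adjacency (adjacency.foldl (fun n p => n + p.2.length) 0 + 1)
    (PySem.Set.ofList [root_id]) [root_id]
  ((PySem.List.enumerate layers 0).foldl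
    (fun d p => p.2.foldl (fun d n => d.insert n p.1) d) PySem.Dict.empty).items

-- ===== PRECONDITION & SPEC =====
def Spec_compute_node_level_py (root_id : String) (adjacency : List (String × List String)) (out : List (String × Int)) : Prop := out = compute_node_level_py_alt root_id adjacency
instance (root_id : String) (adjacency : List (String × List String)) (out : List (String × Int)) : Decidable (Spec_compute_node_level_py root_id adjacency out) := by unfold Spec_compute_node_level_py; infer_instance

-- ===== CLAIM (what is proved, stated in full; the proofs are below) =====
def Claim_equal_compute_node_level_py : Prop := ∀ (root_id : String) (adjacency : List (String × List String)), Dom_compute_node_level_py root_id adjacency → Spec_compute_node_level_py root_id adjacency (compute_node_level_py root_id adjacency)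

-- ===== LEMMAS AND PROOFS =====

-- the flattening of a layer list with consecutive integer depths starting at d
def pvFlat : Int → List (List String) → List (String × Int)
  | _, [] => []
  | d, l :: ls => l.map (fun n => (n, d)) ++ pvFlat (d + 1) ls

-- all strings that can ever be discovered as children
def pvU (adjacency : List (String × List String)) : List String :=
  adjacency.flatMap (·.2)

-- number of potential children not yet labeled: the termination/fuel measure
def pvUnseen (adjacency : List (String × List String)) (L : PySem.Dict String Int) : Nat :=
  ((pvU adjacency).dedup.filter (fun c => !(L.contains c))).length

-- processing one popped node in A = one inner fold
def pvStepA (adjacency : List (String × List String))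
    (s : PySem.Dict String Int × List String) (node : String) :
    PySem.Dict String Int × List String :=
  (pvAdj adjacency node).foldl (pvA_child node) s

lemma pvA_loop_nil (adjacency : List (String × List String)) (f : Nat)
    (L : PySem.Dict String Int) : pvA_loop adjacency f L [] = L := by
  cases f <;> rfl

-- the accumulator-append normal form: a fold whose step only appends to the second component
lemma pv_foldl_acc_append {α : Type} {f : α × List String → String → α × List String}
    (hf : ∀ L out c, f (L, out) c = ((f (L, []) c).1, out ++ (f (L, []) c).2)) :
    ∀ (cs : List String) (L : α) (out : List String),
      cs.foldl f (L, out) = ((cs.foldl f (L, [])).1, out ++ (cs.foldl f (L, [])).2) := by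
  intro cs
  induction cs with
  | nil => intro L out; simp
  | cons c cs ih =>
    intro L out
    have h1 : f (L, []) c = ((f (L, []) c).1, (f (L, []) c).2) := rfl
    simp only [List.foldl_cons]
    have h2 := ih (f (L, []) c).1 (f (L, []) c).2
    rw [← h1] at h2
    rw [hf L out c, ih, h2]
    simp [List.append_assoc]

lemma pvA_child_append (n : String) :
    ∀ L out c, pvA_child n (L, out) c = ((pvA_child n (L, []) c).1, out ++ (pvA_child n (L, []) c).2) := by
  intro L out c
  simp only [pvA_child]
  cases L.get? c with
  | none => simp
  | some cur => dsimp only; split <;> simp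

lemma pvStepA_append (adjacency : List (String × List String)) :
    ∀ L out n, pvStepA adjacency (L, out) n
      = ((pvStepA adjacency (L, []) n).1, out ++ (pvStepA adjacency (L, []) n).2) := by
  intro L out n
  exact pv_foldl_acc_append (pvA_child_append n) _ L out

-- A's queue scheduling: running the loop on q ++ pend equals batching a whole round over q
lemma pvA_loop_round (adjacency : List (String × List String)) :
    ∀ (q pend : List String) (f : Nat) (L : PySem.Dict String Int),
      pvA_loop adjacency (q.length + f) L (q ++ pend)
        = pvA_loop adjacency f (q.foldl (pvStepA adjacency) (L, [])).1
            (pend ++ (q.foldl (pvStepA adjacency) (L, [])).2) := by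
  intro q
  induction q with
  | nil => intro pend f L; simp
  | cons n q ih =>
    intro pend f L
    have hlen : (n :: q).length + f = (q.length + f) + 1 := by simp; omega
    rw [hlen]
    show pvA_loop adjacency (q.length + f)
        (pvStepA adjacency (L, (q ++ pend)) n).1 (pvStepA adjacency (L, (q ++ pend)) n).2 = _
    rw [pvStepA_append]
    have h2 : (q ++ pend) ++ (pvStepA adjacency (L, []) n).2
        = q ++ (pend ++ (pvStepA adjacency (L, []) n).2) := by simp
    rw [h2, ih]
    have h3 : q.foldl (pvStepA adjacency) (pvStepA adjacency (L, []) n) =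
        ((q.foldl (pvStepA adjacency) ((pvStepA adjacency (L, []) n).1, [])).1,
          (pvStepA adjacency (L, []) n).2 ++ (q.foldl (pvStepA adjacency) ((pvStepA adjacency (L, []) n).1, [])).2) := by
      have := pv_foldl_acc_append (pvStepA_append adjacency) q
        (pvStepA adjacency (L, []) n).1 (pvStepA adjacency (L, []) n).2
      simpa using this
    simp only [List.foldl_cons]
    rw [h3]
    simp [List.append_assoc]

-- everything pvAdj can return lies in pvU
lemma pv_mem_items_update (l : List (String × List String)) :
    ∀ (d : PySem.Dict String (List String)) (p : String × List String),
      p ∈ (d.update l).items → p ∈ d.items ∨ p ∈ l := by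
  induction l with
  | nil => intro d p h; exact Or.inl (by simpa [PySem.Dict.update] using h)
  | cons q l ih =>
    intro d p h
    simp only [PySem.Dict.update, List.foldl_cons] at h
    rcases ih (d.insert q.1 q.2) p h with h' | h'
    · rcases (PySem.Dict.mem_items_insert d q.1 q.2 p).1 h' with h'' | h''
      · exact Or.inr (by simp [h''])
      · exact Or.inl h''.1
    · exact Or.inr (List.mem_cons_of_mem _ h')

lemma pvAdj_subset (adjacency : List (String × List String)) (n c : String)
    (h : c ∈ pvAdj adjacency n) : c ∈ pvU adjacency := by
  unfold pvAdj at h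
  rw [PySem.Dict.getD_eq_get?_getD] at h
  cases hg : (PySem.Dict.ofList adjacency).get? n with
  | none => rw [hg] at h; simp at h
  | some v =>
    rw [hg] at h
    simp only [Option.getD_some] at h
    have hm : (n, v) ∈ (PySem.Dict.ofList adjacency).items :=
      PySem.Dict.mem_items_of_get?_eq_some _ hg
    have hmem : (n, v) ∈ adjacency := by
      rcases pv_mem_items_update adjacency PySem.Dict.empty (n, v) hm with h' | h'
      · simp [PySem.Dict.empty] at h'
      · exact h'
    exact List.mem_flatMap.2 ⟨(n, v), hmem, h⟩

-- one node's children, processed from an invariant state: A's fold with the levels dict and B's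
-- fold with the seen-set (= the dict's key list) discover the same new nodes in the same order
lemma pvChildFold (n : String) (depth : Int) (cs : List String) :
    ∀ (L : PySem.Dict String Int) (out : List String),
      L.keys.Nodup → L.get? n = some depth → (∀ p ∈ L.items, p.2 ≤ depth + 1) →
      ∃ (L' : PySem.Dict String Int) (new : List String),
        cs.foldl (pvA_child n) (L, out) = (L', out ++ new) ∧
        cs.foldl pvB_child (L.keys, out) = (L'.keys, out ++ new) ∧
        L'.keys = L.keys ++ new ∧ L'.keys.Nodup ∧ (∀ c ∈ new, c ∈ cs) ∧
        L'.items = L.items ++ new.map (fun c => (c, depth + 1)) ∧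
        (∀ m, L.contains m = true → L'.get? m = L.get? m) ∧
        (∀ c ∈ new, L'.get? c = some (depth + 1)) ∧
        (∀ p ∈ L'.items, p.2 ≤ depth + 1) := by
  induction cs with
  | nil =>
    intro L out hnd hn hb
    exact ⟨L, [], by simp, by simp, by simp, hnd, by simp, by simp, fun m _ => rfl, by simp, hb⟩
  | cons c cs ih =>
    intro L out hnd hn hb
    have hgd : L.getD n 0 = depth := PySem.Dict.getD_of_get?_eq_some L 0 hn
    have hnk : n ∈ L.keys := (PySem.Dict.contains_iff_mem_keys L n).1
      (by rw [PySem.Dict.contains_eq_isSome_get?, hn]; rfl)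
    by_cases hc : L.contains c = true
    · -- child already labeled: A's relaxation test provably fails, B's membership test succeeds
      obtain ⟨cur, hcur⟩ : ∃ cur, L.get? c = some cur := by
        rw [PySem.Dict.contains_eq_isSome_get?] at hc
        exact Option.isSome_iff_exists.1 hc
      have hbound : cur ≤ depth + 1 := hb (c, cur) (PySem.Dict.mem_items_of_get?_eq_some L hcur)
      have hA : pvA_child n (L, out) c = (L, out) := by
        simp only [pvA_child, hcur, hgd]
        have hlt : ¬ (depth + 1 < cur) := by omega
        simp [hlt]
      have hck : c ∈ L.keys := (PySem.Dict.contains_iff_mem_keys L c).1 hc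
      have hB : pvB_child (L.keys, out) c = (L.keys, out) := by
        simp [pvB_child, hck]
      obtain ⟨L', new, h1, h2, h3, h4, h5, hi, h6, h7, h8⟩ := ih L out hnd hn hb
      exact ⟨L', new, by simpa [hA] using h1, by simpa [hB] using h2, h3, h4,
        fun c' h => List.mem_cons_of_mem _ (h5 c' h), hi, h6, h7, h8⟩
    · -- fresh child: A inserts it at level depth+1, B adds it to the seen-set; both append it
      have hc' : L.contains c = false := by simpa using hc
      have hgnone : L.get? c = none := (PySem.Dict.get?_eq_none_iff_contains L c).2 hc'
      have hcnm : c ∉ L.keys := fun h => by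
        rw [(PySem.Dict.contains_iff_mem_keys L c).2 h] at hc'; simp at hc'
      have hne : n ≠ c := fun h => hcnm (h ▸ hnk)
      have hA : pvA_child n (L, out) c = (L.insert c (depth + 1), out ++ [c]) := by
        simp [pvA_child, hgnone, hgd]
      have hkeys : (L.insert c (depth + 1)).keys = L.keys ++ [c] :=
        PySem.Dict.keys_insert_of_not_contains _ _ hc'
      have hB : pvB_child (L.keys, out) c = ((L.insert c (depth + 1)).keys, out ++ [c]) := by
        simp [pvB_child, hcnm, hkeys]
      have hitems : (L.insert c (depth + 1)).items = L.items ++ [(c, depth + 1)] :=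
        PySem.Dict.items_insert_of_not_contains _ _ hc'
      have hn1 : (L.insert c (depth + 1)).get? n = some depth := by
        rw [PySem.Dict.get?_insert_of_ne _ _ hne]; exact hn
      have hb1 : ∀ p ∈ (L.insert c (depth + 1)).items, p.2 ≤ depth + 1 := by
        intro p hp
        rw [hitems] at hp
        rcases List.mem_append.1 hp with h | h
        · exact hb p h
        · simp at h; simp [h]
      obtain ⟨L', new, h1, h2, h3, h4, h5, hi, h6, h7, h8⟩ :=
        ih (L.insert c (depth + 1)) (out ++ [c])
          (PySem.Dict.nodup_keys_insert _ _ _ hnd) hn1 hb1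
      refine ⟨L', c :: new, ?_, ?_, ?_, h4, ?_, ?_, ?_, ?_, h8⟩
      · simpa [hA] using h1
      · simpa [hB] using h2
      · rw [h3, hkeys]; simp
      · intro c' h
        rcases List.mem_cons.1 h with h | h
        · simp [h]
        · exact List.mem_cons_of_mem _ (h5 c' h)
      · rw [hi, hitems]; simp
      · intro m hm
        have hmne : m ≠ c := fun h => by rw [h] at hm; (rw [hm] at hc'; simp at hc')
        have hm1 : (L.insert c (depth + 1)).contains m = true := by
          rw [PySem.Dict.contains_insert]; simp [hm]
        rw [h6 m hm1, PySem.Dict.get?_insert_of_ne _ _ hmne]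
      · intro c' h
        rcases List.mem_cons.1 h with h | h
        · subst h
          rw [h6 c' (PySem.Dict.contains_insert_self L c' (depth + 1))]
          exact PySem.Dict.get?_insert_self L c' (depth + 1)
        · exact h7 c' h

-- a whole round: A's fold over the frontier with the dict = B's fold with the seen-set
lemma pvRoundEq (adjacency : List (String × List String)) (depth : Int) (q : List String) :
    ∀ (L : PySem.Dict String Int) (out : List String),
      L.keys.Nodup → (∀ n ∈ q, L.get? n = some depth) → (∀ p ∈ L.items, p.2 ≤ depth + 1) →
      ∃ (L' : PySem.Dict String Int) (new : List String),
        q.foldl (pvStepA adjacency) (L, out) = (L', out ++ new) ∧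
        q.foldl (pvB_node adjacency) (L.keys, out) = (L'.keys, out ++ new) ∧
        L'.keys = L.keys ++ new ∧ L'.keys.Nodup ∧ (∀ c ∈ new, c ∈ pvU adjacency) ∧
        L'.items = L.items ++ new.map (fun c => (c, depth + 1)) ∧
        (∀ m, L.contains m = true → L'.get? m = L.get? m) ∧
        (∀ c ∈ new, L'.get? c = some (depth + 1)) ∧
        (∀ p ∈ L'.items, p.2 ≤ depth + 1) := by
  induction q with
  | nil =>
    intro L out hnd _ hb
    exact ⟨L, [], by simp, by simp, by simp, hnd, by simp, by simp, fun m _ => rfl, by simp, hb⟩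
  | cons n q ih =>
    intro L out hnd hq hb
    obtain ⟨L1, new1, hA1, hB1, hk1, hnd1, hsub1, hi1, hpres1, hval1, hb1⟩ :=
      pvChildFold n depth (pvAdj adjacency n) L out hnd (hq n List.mem_cons_self) hb
    have hcontains1 : ∀ m, L.contains m = true → L1.contains m = true := by
      intro m hm
      rw [PySem.Dict.contains_iff_mem_keys] at hm ⊢
      rw [hk1]; exact List.mem_append_left _ hm
    have hq1 : ∀ m ∈ q, L1.get? m = some depth := by
      intro m hm
      have hc : L.contains m = true := by
        rw [PySem.Dict.contains_eq_isSome_get?, hq m (List.mem_cons_of_mem n hm)]; rfl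
      rw [hpres1 m hc]; exact hq m (List.mem_cons_of_mem n hm)
    obtain ⟨L', new2, hA2, hB2, hk2, hnd2, hsub2, hi2, hpres2, hval2, hb2⟩ :=
      ih L1 (out ++ new1) hnd1 hq1 hb1
    have hcontains2 : ∀ m, L1.contains m = true → L'.contains m = true := by
      intro m hm
      rw [PySem.Dict.contains_iff_mem_keys] at hm ⊢
      rw [hk2]; exact List.mem_append_left _ hm
    refine ⟨L', new1 ++ new2, ?_, ?_, ?_, hnd2, ?_, ?_, ?_, ?_, hb2⟩
    · show List.foldl (pvStepA adjacency) (pvStepA adjacency (L, out) n) q = _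
      rw [show pvStepA adjacency (L, out) n = (L1, out ++ new1) from hA1, hA2]
      simp
    · show List.foldl (pvB_node adjacency) (pvB_node adjacency (L.keys, out) n) q = _
      rw [show pvB_node adjacency (L.keys, out) n = (L1.keys, out ++ new1) from hB1, hB2]
      simp
    · rw [hk2, hk1]; simp
    · intro c hc
      rcases List.mem_append.1 hc with h | h
      · exact pvAdj_subset adjacency n c (hsub1 c h)
      · exact hsub2 c h
    · rw [hi2, hi1]; simp
    · intro m hm
      rw [hpres2 m (hcontains1 m hm), hpres1 m hm]
    · intro c hc
      rcases List.mem_append.1 hc with h | h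
      · have hcm : L1.contains c = true := by
          rw [PySem.Dict.contains_eq_isSome_get?, hval1 c h]; rfl
        rw [hpres2 c hcm]; exact hval1 c h
      · exact hval2 c h

-- discovering 'new' fresh potential children shrinks the measure by exactly new.length
lemma pvUnseen_split (adjacency : List (String × List String))
    (L L' : PySem.Dict String Int) (new : List String)
    (hk : L'.keys = L.keys ++ new) (hnd : L'.keys.Nodup)
    (hU : ∀ c ∈ new, c ∈ pvU adjacency) :
    pvUnseen adjacency L' + new.length = pvUnseen adjacency L := by
  classical
  have hsplit := List.nodup_append.1 (hk ▸ hnd)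
  have hnew_nodup : new.Nodup := hsplit.2.1
  have hdisj : ∀ c ∈ new, c ∉ L.keys := fun c hc hk' => hsplit.2.2 c hk' c hc rfl
  unfold pvUnseen
  have hcont : ∀ (M : PySem.Dict String Int) (c : String),
      (!(M.contains c)) = !decide (c ∈ M.keys) := by
    intro M c; rw [PySem.Dict.contains_eq_decide_mem_keys]
  simp only [hcont]
  set D := (pvU adjacency).dedup with hD
  have hDnodup : D.Nodup := List.nodup_dedup _
  have h1 : (D.filter (fun c => !decide (c ∈ L.keys))).length
      = (D.filter (fun c => !decide (c ∈ L.keys) && decide (c ∈ new))).length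
        + (D.filter (fun c => !decide (c ∈ L.keys) && !decide (c ∈ new))).length := by
    induction D with
    | nil => simp
    | cons a D ihD =>
      simp only [List.filter_cons]
      by_cases ha : a ∈ L.keys <;> by_cases hb : a ∈ new <;>
        simp [ha, hb, ihD] <;> omega
  have h2 : D.filter (fun c => !decide (c ∈ L'.keys))
      = D.filter (fun c => !decide (c ∈ L.keys) && !decide (c ∈ new)) := by
    apply List.filter_congr
    intro c _
    rw [hk]
    by_cases h1' : c ∈ L.keys <;> by_cases h2' : c ∈ new <;>
      simp [h1', h2', List.mem_append]
  have h3 : D.filter (fun c => !decide (c ∈ L.keys) && decide (c ∈ new))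
      = D.filter (fun c => decide (c ∈ new)) := by
    apply List.filter_congr
    intro c _
    by_cases h2' : c ∈ new
    · simp [h2', hdisj c h2']
    · simp [h2']
  have h4 : (D.filter (fun c => decide (c ∈ new))).length = new.length := by
    have hperm : (D.filter (fun c => decide (c ∈ new))).Perm new := by
      rw [List.perm_ext_iff_of_nodup (List.Nodup.filter _ hDnodup) hnew_nodup]
      intro c
      simp only [List.mem_filter, decide_eq_true_eq]
      constructor
      · exact fun h => h.2
      · intro h
        exact ⟨List.mem_dedup.2 (hU c h), h⟩
    exact hperm.length_eq
  rw [h1, h2, h3, h4]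
  omega

-- a nonempty layer is the head of its own layer list (one unfolding of the while loop)
lemma pvB_layers_cons_self (adjacency : List (String × List String)) (f : Nat)
    (seen : PySem.Set String) (x : String) (xs : List String) :
    pvB_layers adjacency (f + 1) seen (x :: xs)
      = (x :: xs) :: (pvB_layers adjacency (f + 1) seen (x :: xs)).tail := by
  have hstep : pvB_layers adjacency (f + 1) seen (x :: xs)
      = (x :: xs) :: pvB_layers adjacency f
          ((x :: xs).foldl (pvB_node adjacency) (seen, [])).1
          ((x :: xs).foldl (pvB_node adjacency) (seen, [])).2 := by
    simp [pvB_layers]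
  rw [hstep, List.tail_cons]

-- main simulation: with sufficient fuel on both sides, A's final dict items are the start items
-- followed by B's remaining layers flattened with consecutive depths; the keys stay Nodup
lemma pvSim (adjacency : List (String × List String)) :
    ∀ (cnt : Nat) (L : PySem.Dict String Int) (frontier : List String) (depth : Int) (fA fB : Nat),
      pvUnseen adjacency L = cnt →
      L.keys.Nodup → (∀ n ∈ frontier, L.get? n = some depth) →
      (∀ p ∈ L.items, p.2 ≤ depth + 1) →
      frontier.length + cnt ≤ fA → 1 + cnt ≤ fB →
      (pvA_loop adjacency fA L frontier).items
          = L.items ++ pvFlat (depth + 1) (pvB_layers adjacency fB L.keys frontier).tail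
        ∧ (pvA_loop adjacency fA L frontier).keys.Nodup := by
  intro cnt
  induction cnt using Nat.strong_induction_on with
  | _ cnt IH =>
    intro L frontier depth fA fB hcnt hnd hfr hb hfa hfb
    cases frontier with
    | nil =>
      rw [pvA_loop_nil]
      refine ⟨?_, hnd⟩
      have : pvB_layers adjacency fB L.keys [] = [[]] := by
        cases fB <;> simp [pvB_layers]
      rw [this]
      simp [pvFlat]
    | cons n q =>
      obtain ⟨f, rfl⟩ : ∃ f, fA = (n :: q).length + f :=
        ⟨fA - (n :: q).length, by omega⟩
      obtain ⟨f', rfl⟩ : ∃ f', fB = f' + 1 := ⟨fB - 1, by omega⟩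
      obtain ⟨L', new, hA, hB, hk, hnd', hUm, hi, hpres, hval, hb'⟩ :=
        pvRoundEq adjacency depth (n :: q) L [] hnd hfr hb
      have hAstep : pvA_loop adjacency ((n :: q).length + f) L (n :: q)
          = pvA_loop adjacency f L' new := by
        have hr := pvA_loop_round adjacency (n :: q) [] f L
        rw [List.append_nil] at hr
        rw [hr, hA]
        simp
      have hBstep : pvB_layers adjacency (f' + 1) L.keys (n :: q)
          = (n :: q) :: pvB_layers adjacency f' L'.keys new := by
        show (if (n :: q).isEmpty then _ else _) = _
        rw [hB]
        simp
      rw [hAstep, hBstep]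
      have hmeasure := pvUnseen_split adjacency L L' new hk hnd' hUm
      have hflat : ∀ rest, pvFlat (depth + 1) (new :: rest)
          = new.map (fun c => (c, depth + 1)) ++ pvFlat (depth + 1 + 1) rest := fun _ => rfl
      cases new with
      | nil =>
        rw [pvA_loop_nil]
        have hlayers : pvB_layers adjacency f' L'.keys [] = [[]] := by
          cases f' <;> simp [pvB_layers]
        refine ⟨?_, hnd'⟩
        rw [List.tail_cons, hlayers, hi]
        simp [pvFlat]
      | cons m ms =>
        have hlen : (m :: ms).length = ms.length + 1 := rfl
        obtain ⟨hrec, hrecnd⟩ := IH (pvUnseen adjacency L') (by omega) L' (m :: ms) (depth + 1) f f' rfl hnd'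
          (fun x hx => hval x hx)
          (fun p hp => by have := hb' p hp; omega)
          (by omega) (by omega)
        refine ⟨?_, hrecnd⟩
        have hhd : pvB_layers adjacency f' L'.keys (m :: ms)
            = (m :: ms) :: (pvB_layers adjacency f' L'.keys (m :: ms)).tail := by
          obtain ⟨f'', rfl⟩ : ∃ f'', f' = f'' + 1 := ⟨f' - 1, by omega⟩
          exact pvB_layers_cons_self adjacency f'' L'.keys m ms
        rw [List.tail_cons, hrec, hi]
        conv_rhs => rw [hhd]
        rw [hflat]
        simp [List.append_assoc]

-- the chosen fuel dominates the measure
lemma pvFuel_ge (adjacency : List (String × List String)) (L : PySem.Dict String Int) :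
    pvUnseen adjacency L ≤ adjacency.foldl (fun n p => n + p.2.length) 0 := by
  have hsum : ∀ (l : List (String × List String)) (a : Nat),
      l.foldl (fun n p => n + p.2.length) a = a + (l.flatMap (·.2)).length := by
    intro l
    induction l with
    | nil => intro a; simp
    | cons p l ih => intro a; simp [List.foldl_cons, ih]; omega
  rw [hsum]
  calc pvUnseen adjacency L ≤ (pvU adjacency).dedup.length := List.length_filter_le _ _
    _ ≤ (pvU adjacency).length := (List.dedup_sublist _).length_le
    _ = 0 + (adjacency.flatMap (·.2)).length := by rw [Nat.zero_add]; rfl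

-- the keys of a flattened layer list are the flattened layers
lemma pvFlat_keys : ∀ (ls : List (List String)) (d : Int),
    (pvFlat d ls).map (·.1) = ls.flatten := by
  intro ls
  induction ls with
  | nil => intro d; rfl
  | cons l ls ih => intro d; simp [pvFlat, ih, Function.comp_def]

-- B phase 2: building a dict from enumerate(layers) whose nodes are globally fresh and distinct
-- appends exactly the flattened pairs
lemma pvBuild (ls : List (List String)) :
    ∀ (s : Int) (d : PySem.Dict String Int),
      (d.keys ++ ls.flatten).Nodup →
      ((PySem.List.enumerate ls s).foldl
          (fun d p => p.2.foldl (fun d n => d.insert n p.1) d) d).items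
        = d.items ++ pvFlat s ls := by
  induction ls with
  | nil => intro s d _; simp [PySem.List.enumerate_nil, pvFlat]
  | cons l ls ih =>
    intro s d hnd
    rw [PySem.List.enumerate_cons]
    simp only [List.foldl_cons]
    have hnd' : (d.keys ++ (l ++ ls.flatten)).Nodup := by simpa using hnd
    have hfresh : ∀ a ∈ l, d.contains a = false := by
      intro a ha
      have : a ∉ d.keys := by
        intro hk
        exact (List.nodup_append.1 hnd').2.2 a hk a (List.mem_append_left _ ha) rfl
      rw [PySem.Dict.contains_eq_decide_mem_keys]
      simpa using this
    have hlnd : l.Nodup := (List.nodup_append.1 (List.nodup_append.1 hnd').2.1).1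
    have hinner : (l.foldl (fun d n => d.insert n s) d).items
        = d.items ++ l.map (fun n => (n, s)) := by
      have := PySem.Dict.items_foldl_insert_fresh (l := l) (k := fun n => n)
        (v := fun _ => s) (d := d) hfresh (by simpa using hlnd)
      simpa using this
    have hkeys : (l.foldl (fun d n => d.insert n s) d).keys = d.keys ++ l := by
      have : (l.foldl (fun d n => d.insert n s) d).keys
          = ((l.foldl (fun d n => d.insert n s) d).items).map (·.1) := rfl
      rw [this, hinner]
      simp [PySem.Dict.keys, Function.comp_def]
    have hnd2 : ((l.foldl (fun d n => d.insert n s) d).keys ++ ls.flatten).Nodup := by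
      rw [hkeys]
      have : d.keys ++ l ++ ls.flatten = d.keys ++ (l ++ ls.flatten) := by simp
      rw [this]
      exact hnd'
    rw [ih (s + 1) _ hnd2, hinner, pvFlat]
    simp [List.append_assoc]

-- ===== VERDICT (by name: the statement is the Claim_ definition above) =====
theorem compute_node_level_py_spec : Claim_equal_compute_node_level_py := by
  intro root_id adjacency _
  unfold Spec_compute_node_level_py compute_node_level_py compute_node_level_py_alt
  have hL0 : PySem.Dict.ofList [(root_id, (0 : Int))] = PySem.Dict.empty.insert root_id 0 := rfl
  have hitems : (PySem.Dict.empty.insert root_id (0 : Int)).items = [(root_id, (0 : Int))] := by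
    rw [PySem.Dict.items_insert_of_not_contains _ _ (PySem.Dict.contains_empty root_id)]
    rfl
  have hkeys0 : (PySem.Dict.ofList [(root_id, (0 : Int))]).keys = [root_id] := by
    rw [hL0]
    show ((PySem.Dict.empty.insert root_id (0 : Int)).items).map (·.1) = [root_id]
    rw [hitems]; rfl
  have hset0 : PySem.Set.ofList [root_id] = [root_id] := rfl
  set E := adjacency.foldl (fun n p => n + p.2.length) 0 with hE
  have hfuel := pvFuel_ge adjacency (PySem.Dict.ofList [(root_id, 0)])
  obtain ⟨hsim, hsnd⟩ := pvSim adjacency (pvUnseen adjacency (PySem.Dict.ofList [(root_id, 0)]))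
    (PySem.Dict.ofList [(root_id, 0)]) [root_id] 0 (1 + E) (E + 1) rfl
    (by rw [hkeys0]; simp)
    (by
      intro n hn
      rcases List.mem_singleton.1 hn with rfl
      rw [hL0]
      exact PySem.Dict.get?_insert_self _ _ _)
    (by
      intro p hp
      rw [hL0, hitems] at hp
      rcases List.mem_singleton.1 hp with rfl
      norm_num)
    (by simp only [List.length_singleton]; omega)
    (by omega)
  -- name the layer list and identify A's items with its full flattening
  set layers := pvB_layers adjacency (E + 1) (PySem.Set.ofList [root_id]) [root_id] with hlayers
  have hlayers' : pvB_layers adjacency (E + 1) (PySem.Dict.ofList [(root_id, (0:Int))]).keys [root_id]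
      = layers := by rw [hkeys0, hlayers, hset0]
  have hhead : layers = [root_id] :: layers.tail := by
    rw [hlayers]
    exact pvB_layers_cons_self adjacency E (PySem.Set.ofList [root_id]) root_id []
  have hAitems : (pvA_loop adjacency (1 + E) (PySem.Dict.ofList [(root_id, 0)]) [root_id]).items
      = pvFlat 0 layers := by
    rw [hsim, hlayers', hL0, hitems]
    conv_rhs => rw [hhead]
    rfl
  rw [hAitems]
  -- B phase 2 builds exactly that flattening: its keys are A's keys, hence Nodup
  have hknd : (pvFlat 0 layers).map (·.1) |>.Nodup := by
    have : (pvFlat 0 layers).map (·.1)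
        = ((pvA_loop adjacency (1 + E) (PySem.Dict.ofList [(root_id, 0)]) [root_id]).items).map (·.1) := by
      rw [hAitems]
    rw [this]
    exact hsnd
  have hflnd : ((PySem.Dict.empty (κ := String) (ν := Int)).keys ++ layers.flatten).Nodup := by
    have hek : (PySem.Dict.empty (κ := String) (ν := Int)).keys = [] := rfl
    rw [hek, List.nil_append, ← pvFlat_keys layers 0]
    exact hknd
  have := pvBuild layers 0 PySem.Dict.empty hflnd
  rw [this]
  rfl
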